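-- pv_equiv track=rewrite | github.com/unworthyzeus/TFGAllProgress_Tries_and_Attempts | scripts/plot_cluster_validate_metrics.py | order_metric_names
-- ===== SOURCE A (Python) =====
-- from typing import Any, Dict, List, Optional, Sequence, Tuple
--
-- METRIC_ORDER: Tuple[str, ...] = ("path_loss", "delay_spread", "angular_spread")
--
-- def order_metric_names(names: Sequence[str]) -> List[str]:
--     names_set = set(names)
--     ordered: List[str] = []
--     for m in METRIC_ORDER:
--         if m in names_set:
--             ordered.append(m)
--     rest = sorted(names_set - set(ordered))
--     ordered.extend(rest)
--     return ordered
-- ===== SOURCE B (Python) =====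
-- from typing import List, Sequence, Tuple
--
-- METRIC_ORDER: Tuple[str, ...] = ("path_loss", "delay_spread", "angular_spread")
--
-- def order_metric_names(names: Sequence[str]) -> List[str]:
--     rank = {m: i for i, m in enumerate(METRIC_ORDER)}
--     return sorted(set(names), key=lambda x: (rank.get(x, len(METRIC_ORDER)), x))
-- ===== Notes on version B (the rewrite author's own statement) =====
-- stated objective: idiomatic
-- what changed: Replaces the prepend-loop over METRIC_ORDER plus a separate sort of the remainder by a single composite-key sort over the deduplicated names, keyed by (priority rank, name) with non-priority names ranked after all priorities.
import Mathlib
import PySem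

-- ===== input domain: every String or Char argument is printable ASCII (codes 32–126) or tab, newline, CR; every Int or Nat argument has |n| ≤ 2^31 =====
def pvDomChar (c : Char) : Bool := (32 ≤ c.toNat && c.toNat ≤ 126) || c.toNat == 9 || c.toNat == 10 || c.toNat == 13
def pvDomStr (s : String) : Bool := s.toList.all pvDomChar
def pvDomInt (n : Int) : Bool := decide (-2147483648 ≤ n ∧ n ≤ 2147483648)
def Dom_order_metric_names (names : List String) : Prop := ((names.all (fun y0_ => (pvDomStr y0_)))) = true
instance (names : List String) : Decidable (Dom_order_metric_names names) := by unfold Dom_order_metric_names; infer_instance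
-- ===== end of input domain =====

-- ===== PORT A =====
-- B reorders by a single composite-key sort instead of A's prepend loop + remainder sort (idiomatic; same value).
def METRIC_ORDER : List String := ["path_loss", "delay_spread", "angular_spread"]

def order_metric_names (names : List String) : List String :=
  let namesSet : PySem.Set String := PySem.Set.ofList names
  let ordered : List String :=
    METRIC_ORDER.foldl (fun acc m => if PySem.Set.contains namesSet m then acc ++ [m] else acc) []
  let rest : List String :=
    PySem.List.sorted (PySem.Set.diff namesSet (PySem.Set.ofList ordered)) (fun x => x) false
  ordered ++ rest

-- ===== PORT B =====
def order_metric_names_alt (names : List String) : List String :=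
  let rank : PySem.Dict String Int :=
    (PySem.List.enumerate METRIC_ORDER).foldl (fun d p => PySem.Dict.insert d p.2 p.1) ⟨[]⟩
  PySem.List.sorted2 (PySem.Set.ofList names)
    (fun x => PySem.Dict.getD rank x (METRIC_ORDER.length : Int)) (fun x => x) false

-- ===== PRECONDITION & SPEC =====
def Spec_order_metric_names (names : List String) (out : List String) : Prop := out = order_metric_names_alt names
instance (names : List String) (out : List String) : Decidable (Spec_order_metric_names names out) := by unfold Spec_order_metric_names; infer_instance

-- ===== CLAIM (what is proved, stated in full; the proofs are below) =====
def Claim_equal_order_metric_names : Prop := ∀ (names : List String), Dom_order_metric_names names → Spec_order_metric_names names (order_metric_names names)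

-- ===== LEMMAS AND PROOFS =====

-- the priority rank B's key uses, on the concrete rank dictionary
def pvRank (x : String) : Int :=
  PySem.Dict.getD ⟨[("path_loss", (0 : Int)), ("delay_spread", 1), ("angular_spread", 2)]⟩ x 3

-- sorted2 over an Int key and a String key is sorted by the lexicographic pair key
theorem sorted2_eq_sorted_lex {α : Type} (xs : List α) (k1 : α → Int) (k2 : α → String) :
    PySem.List.sorted2 xs k1 k2 false
      = PySem.List.sorted xs (fun x => toLex (k1 x, k2 x)) false := by
  have hcmp : (fun a b : α => decide (k1 a < k1 b) || (!decide (k1 b < k1 a) && decide (k2 a < k2 b)))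
      = (fun a b : α => decide (toLex (k1 a, k2 a) < toLex (k1 b, k2 b))) := by
    funext a b
    rcases lt_trichotomy (k1 a) (k1 b) with h | h | h
    · simp [Prod.Lex.toLex_lt_toLex, h]
    · simp [Prod.Lex.toLex_lt_toLex, h]
    · simp [Prod.Lex.toLex_lt_toLex, not_lt_of_gt h, h.ne', not_le_of_gt h]
  rw [PySem.List.sorted_eq_foldl_insertBy]
  show List.foldl (fun acc x => PySem.List.insertBy
        (fun a b => decide (k1 a < k1 b) || (!decide (k1 b < k1 a) && decide (k2 a < k2 b))) x acc) [] xs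
      = List.foldl (fun acc x => PySem.List.insertBy
        (fun a b => decide (toLex (k1 a, k2 a) < toLex (k1 b, k2 b))) x acc) [] xs
  rw [hcmp]

theorem pvRank_eq_three (x : String) (h : x ∉ METRIC_ORDER) : pvRank x = 3 := by
  simp only [METRIC_ORDER, List.mem_cons, List.not_mem_nil, or_false, not_or] at h
  obtain ⟨h1, h2, h3⟩ := h
  have e1 : ("path_loss" == x) = false := by simp [Ne.symm h1]
  have e2 : ("delay_spread" == x) = false := by simp [Ne.symm h2]
  have e3 : ("angular_spread" == x) = false := by simp [Ne.symm h3]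
  simp [pvRank, PySem.Dict.getD, PySem.Dict.get?, List.find?, e1, e2, e3]

theorem pvRank_lt_three (x : String) (h : x ∈ METRIC_ORDER) : pvRank x < 3 := by
  simp only [METRIC_ORDER, List.mem_cons, List.not_mem_nil, or_false] at h
  rcases h with rfl | rfl | rfl <;> decide

-- A's shape (priority list L, then the remainder sorted) names the result of B's single keyed sort
theorem key_lemma (S L : List String) (hS : S.Nodup) (hL : L.Nodup)
    (hsub : ∀ x ∈ L, x ∈ S)
    (hcover : ∀ m ∈ METRIC_ORDER, m ∈ S → m ∈ L)
    (hLM : ∀ x ∈ L, x ∈ METRIC_ORDER)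
    (hpair : L.Pairwise (fun a b => pvRank a < pvRank b)) :
    PySem.List.sorted S (fun x => toLex (pvRank x, x)) false
      = L ++ PySem.List.sorted (PySem.Set.diff S (PySem.Set.ofList L)) (fun x => x) false := by
  rw [PySem.Set.ofList_eq_self_of_nodup L hL]
  have hDdef : PySem.Set.diff S L = S.filter (fun x => !L.contains x) := rfl
  rw [hDdef]
  set D : List String := S.filter (fun x => !L.contains x) with hD
  have hDnodup : D.Nodup := hS.filter _
  have hsortedD := PySem.List.sorted_perm D (fun x => x) false
  have hmemD : ∀ x ∈ D, x ∈ S ∧ x ∉ L := by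
    intro x hx
    rw [hD, List.mem_filter] at hx
    refine ⟨hx.1, ?_⟩
    simpa using hx.2
  have hrankD : ∀ x ∈ D, pvRank x = 3 := by
    intro x hx
    exact pvRank_eq_three x (fun hxM => (hmemD x hx).2 (hcover x hxM (hmemD x hx).1))
  apply PySem.List.sorted_eq_of_perm_of_pairwise_lt
  · -- permutation
    have h2 : (S.filter (fun x => L.contains x)).Perm L := by
      apply (List.perm_ext_iff_of_nodup (hS.filter _) hL).mpr
      intro x
      simp only [List.mem_filter, List.contains_iff_mem]
      exact ⟨fun h => h.2, fun h => ⟨hsub x h, h⟩⟩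
    exact (List.Perm.append h2.symm hsortedD).trans
      (by rw [hD]; exact List.filter_append_perm (fun x => L.contains x) S)
  · -- pairwise strictly increasing composite key
    rw [List.pairwise_append]
    refine ⟨hpair.imp (fun {a b} h => Prod.Lex.toLex_lt_toLex.mpr (Or.inl h)), ?_, ?_⟩
    · have hle := PySem.List.sorted_pairwise D (fun x => x)
      have hne : (PySem.List.sorted D (fun x => x) false).Nodup := hsortedD.symm.nodup hDnodup
      have hlt : (PySem.List.sorted D (fun x => x) false).Pairwise (fun a b => a < b) :=
        (hle.and hne).imp (fun h => lt_of_le_of_ne h.1 h.2)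
      refine hlt.imp_of_mem ?_
      intro a b ha hb hab
      have ha3 := hrankD a (hsortedD.mem_iff.mp ha)
      have hb3 := hrankD b (hsortedD.mem_iff.mp hb)
      rw [Prod.Lex.toLex_lt_toLex]
      exact Or.inr ⟨ha3.trans hb3.symm, hab⟩
    · intro a ha b hb
      have ha3 := pvRank_lt_three a (hLM a ha)
      have hb3 := hrankD b (hsortedD.mem_iff.mp hb)
      exact Prod.Lex.toLex_lt_toLex.mpr (Or.inl (by omega))

-- ===== VERDICT (by name: the statement is the Claim_ definition above) =====
theorem order_metric_names_spec : Claim_equal_order_metric_names := by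
  intro names _
  unfold Spec_order_metric_names
  have hS : (PySem.Set.ofList names).Nodup := PySem.Set.nodup_ofList names
  have hB : order_metric_names_alt names
      = PySem.List.sorted (PySem.Set.ofList names) (fun x => toLex (pvRank x, x)) false := by
    have h0 : order_metric_names_alt names
        = PySem.List.sorted2 (PySem.Set.ofList names) pvRank (fun x => x) false := rfl
    rw [h0, sorted2_eq_sorted_lex]
  rw [hB]
  have hA : order_metric_names names
      = (METRIC_ORDER.foldl (fun acc m =>
          if PySem.Set.contains (PySem.Set.ofList names) m then acc ++ [m] else acc) [])
        ++ PySem.List.sorted (PySem.Set.diff (PySem.Set.ofList names)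
            (PySem.Set.ofList (METRIC_ORDER.foldl (fun acc m =>
              if PySem.Set.contains (PySem.Set.ofList names) m then acc ++ [m] else acc) [])))
            (fun x => x) false := rfl
  rw [hA]
  by_cases h1 : "path_loss" ∈ names <;>
  by_cases h2 : "delay_spread" ∈ names <;>
  by_cases h3 : "angular_spread" ∈ names <;>
  · simp [METRIC_ORDER, List.foldl, h1, h2, h3]
    first
    | refine (key_lemma (PySem.Set.ofList names) ["path_loss", "delay_spread", "angular_spread"] hS ?_ ?_ ?_ ?_ ?_).symm
    | refine (key_lemma (PySem.Set.ofList names) ["path_loss", "delay_spread"] hS ?_ ?_ ?_ ?_ ?_).symm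
    | refine (key_lemma (PySem.Set.ofList names) ["path_loss", "angular_spread"] hS ?_ ?_ ?_ ?_ ?_).symm
    | refine (key_lemma (PySem.Set.ofList names) ["delay_spread", "angular_spread"] hS ?_ ?_ ?_ ?_ ?_).symm
    | refine (key_lemma (PySem.Set.ofList names) ["path_loss"] hS ?_ ?_ ?_ ?_ ?_).symm
    | refine (key_lemma (PySem.Set.ofList names) ["delay_spread"] hS ?_ ?_ ?_ ?_ ?_).symm
    | refine (key_lemma (PySem.Set.ofList names) ["angular_spread"] hS ?_ ?_ ?_ ?_ ?_).symm
    | refine (key_lemma (PySem.Set.ofList names) [] hS ?_ ?_ ?_ ?_ ?_).symm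
    · decide
    · intro x hx
      fin_cases hx <;>
        first
        | exact (PySem.Set.mem_ofList names _).mpr h1
        | exact (PySem.Set.mem_ofList names _).mpr h2
        | exact (PySem.Set.mem_ofList names _).mpr h3
    · intro m hm hmS
      fin_cases hm <;>
        first
        | decide
        | exact absurd ((PySem.Set.mem_ofList names _).mp hmS) h1
        | exact absurd ((PySem.Set.mem_ofList names _).mp hmS) h2
        | exact absurd ((PySem.Set.mem_ofList names _).mp hmS) h3
    · decide
    · decide
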